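-- pv_equiv track=rewrite | github.com/Fondamenti18/fondamenti-di-programmazione | students/1806338/homework03/program01.py | pieno
-- ===== SOURCE A (Python) =====
-- def pieno(xf,yf,xi,yi,x,y,img,c):
--     while xf>xi:
--         o=0
--         for x in range(xi,xf+1):
--             for y in range(yi,yf+1):
--                 if img[x][y]!=c:
--                     o=1
--                     break
--         if o==1:
--             xf-=1
--             yf-=1
--         else:
--             break
--     return xf,yf
-- ===== SOURCE B (Python) =====
-- def pieno(xf, yf, xi, yi, x, y, img, c):
--     # One pass: every mismatching pixel (r, col) stays inside the shrinking
--     # rectangle for exactly min(xf-r, yf-col)+1 shrink steps, and a uniform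
--     # rectangle stays uniform when shrunk, so the number of shrinks A performs
--     # is min(m, xf-xi) where m is the largest such survival time.
--     if xf <= xi or yf < yi:
--         return xf, yf
--     m = 0
--     for r in range(xi, xf + 1):
--         row = img[r]
--         for col in range(yi, yf + 1):
--             if row[col] != c:
--                 d = min(xf - r, yf - col) + 1
--                 if d > m:
--                     m = d
--     k = min(m, xf - xi)
--     return xf - k, yf - k
-- ===== Notes on version B (the rewrite author's own statement) =====
-- stated objective: alternative
-- what changed: Replaces A's repeated full rescans of the shrinking rectangle with a single pass that, for each mismatching pixel, computes how many shrink steps it survives (min(xf-r,yf-col)+1) and takes the maximum, clamped by xf-xi; intended as asymptotically cheaper (one scan instead of up to xf-xi scans) but a timing run did not confirm a consistent speed-up.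
-- outside the precondition, e.g. on pieno(1, 1, 0, 0, 0, 0, [[1, 1], [1]], 0): A returns (0, 0), B raises IndexError
import Mathlib
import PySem

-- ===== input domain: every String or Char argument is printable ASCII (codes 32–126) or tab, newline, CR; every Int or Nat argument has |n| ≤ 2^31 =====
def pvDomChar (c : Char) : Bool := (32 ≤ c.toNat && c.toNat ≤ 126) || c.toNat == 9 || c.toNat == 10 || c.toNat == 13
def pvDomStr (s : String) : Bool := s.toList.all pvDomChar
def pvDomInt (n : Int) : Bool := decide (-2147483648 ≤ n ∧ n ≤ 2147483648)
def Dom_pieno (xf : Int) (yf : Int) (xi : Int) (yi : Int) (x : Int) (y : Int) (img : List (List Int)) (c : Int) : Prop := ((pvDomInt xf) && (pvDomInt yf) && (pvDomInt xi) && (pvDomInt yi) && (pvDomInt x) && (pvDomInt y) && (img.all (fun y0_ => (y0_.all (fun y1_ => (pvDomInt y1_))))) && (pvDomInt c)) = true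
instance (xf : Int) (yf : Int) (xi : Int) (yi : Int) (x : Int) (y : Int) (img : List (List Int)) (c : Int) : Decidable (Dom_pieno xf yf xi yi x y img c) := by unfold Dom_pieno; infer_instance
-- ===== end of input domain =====

-- B replaces A's repeated rescans of the shrinking rectangle by ONE pass taking, over all
-- mismatching pixels, the maximum number of shrink steps the pixel survives (objective: alternative).

-- ===== PORT A =====
-- inner 'for y in range(yi, yf+1): if img[x][y] != c: o = 1; break' — iterates y upward, fuel =
-- number of remaining range elements (exactly Python's range); img[x][y] is read inside the loop
-- body as in Python; returns the o contributed by this row (1 at the first mismatch, else 0).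
-- Out-of-range reads (where Python raises, excluded by Pre_) read as c.
def pienoRowF (img : List (List Int)) (c : Int) (r : Int) : Nat → Int → Int
  | 0, _ => 0
  | fuel + 1, y =>
    if PySem.List.pyGetD (PySem.List.pyGetD img r []) y c ≠ c then 1
    else pienoRowF img c r fuel (y + 1)

-- outer 'for x in range(xi, xf+1)' carrying o across rows, same fuel discipline;
-- w = (yf + 1 - yi).toNat is the inner range's length, invariant over one scan
def pienoScanF (img : List (List Int)) (c : Int) (yi : Int) (w : Nat) : Nat → Int → Int → Int
  | 0, _, o => o
  | fuel + 1, r, o =>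
    pienoScanF img c yi w fuel (r + 1)
      (if pienoRowF img c r w yi = 1 then 1 else o)

-- 'while xf > xi: …' — each iteration decreases xf by 1 or returns, so (xf - xi).toNat iterations
-- of fuel are exactly enough: fuel 0 coincides with the loop condition turning false.
def pienoLoop (xi yi c : Int) (img : List (List Int)) : Nat → Int → Int → Int × Int
  | 0, xf, yf => (xf, yf)
  | fuel + 1, xf, yf =>
    if xi < xf then
      if pienoScanF img c yi (yf + 1 - yi).toNat (xf + 1 - xi).toNat xi 0 = 1 then
        pienoLoop xi yi c img fuel (xf - 1) (yf - 1)
      else (xf, yf)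
    else (xf, yf)

def pieno (xf : Int) (yf : Int) (xi : Int) (yi : Int) (x : Int) (y : Int) (img : List (List Int)) (c : Int) : Int × Int :=
  pienoLoop xi yi c img (xf - xi).toNat xf yf

-- ===== PORT B =====
-- transliteration of Source B: one pass over the rectangle; for each mismatch, d = min(xf-r, yf-col)+1
-- (its survival time under diagonal shrinking); m = max of the d's; k = min(m, xf-xi).
def pieno_alt (xf : Int) (yf : Int) (xi : Int) (yi : Int) (x : Int) (y : Int) (img : List (List Int)) (c : Int) : Int × Int :=
  if xf ≤ xi ∨ yf < yi then (xf, yf)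
  else
    let m :=
      (PySem.List.pyRange xi (xf + 1) 1).foldl (fun m r =>
        let row := PySem.List.pyGetD img r ([] : List Int)
        (PySem.List.pyRange yi (yf + 1) 1).foldl (fun m col =>
          if PySem.List.pyGetD row col c ≠ c then
            let d := min (xf - r) (yf - col) + 1
            if d > m then d else m
          else m) m) 0
    let k := min m (xf - xi)
    (xf - k, yf - k)

-- ===== PRECONDITION & SPEC =====
-- Pre_ excludes exactly the inputs on which a scanned index leaves Python's valid (wraparound)
-- range: there A raises IndexError, except when an earlier mismatch in the same row makes A's
-- inner break skip the bad index — an accidental escape on ragged/short rows on which B's full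
-- scan naturally raises, so those inputs are excluded too.
def Pre_pieno (xf : Int) (yf : Int) (xi : Int) (yi : Int) (x : Int) (y : Int) (img : List (List Int)) (c : Int) : Prop :=
  xf ≤ xi ∨ yf < yi ∨
    (-(img.length : Int) ≤ xi ∧ xf < (img.length : Int) ∧
      ∀ r ∈ PySem.List.pyRange xi (xf + 1) 1,
        -((PySem.List.pyGetD img r []).length : Int) ≤ yi ∧
          yf < ((PySem.List.pyGetD img r []).length : Int))
instance (xf : Int) (yf : Int) (xi : Int) (yi : Int) (x : Int) (y : Int) (img : List (List Int)) (c : Int) : Decidable (Pre_pieno xf yf xi yi x y img c) := by unfold Pre_pieno; infer_instance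

def pvWitness_pieno : Int × Int × Int × Int × Int × Int × List (List Int) × Int :=
  (1, 1, 0, 0, 0, 0, [[5, 5], [5, 5]], 5)

def Spec_pieno (xf : Int) (yf : Int) (xi : Int) (yi : Int) (x : Int) (y : Int) (img : List (List Int)) (c : Int) (out : Int × Int) : Prop := out = pieno_alt xf yf xi yi x y img c
instance (xf : Int) (yf : Int) (xi : Int) (yi : Int) (x : Int) (y : Int) (img : List (List Int)) (c : Int) (out : Int × Int) : Decidable (Spec_pieno xf yf xi yi x y img c out) := by unfold Spec_pieno; infer_instance

-- ===== CLAIM (what is proved, stated in full; the proofs are below) =====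
def Claim_equal_pieno : Prop := ∀ (xf : Int) (yf : Int) (xi : Int) (yi : Int) (x : Int) (y : Int) (img : List (List Int)) (c : Int), Dom_pieno xf yf xi yi x y img c → Pre_pieno xf yf xi yi x y img c → Spec_pieno xf yf xi yi x y img c (pieno xf yf xi yi x y img c)

-- ===== LEMMAS AND PROOFS =====

theorem pienoRowF_eq_one_iff (img : List (List Int)) (c : Int) (r : Int) :
    ∀ (fuel : Nat) (a : Int), pienoRowF img c r fuel a = 1 ↔
      ∃ col : Int, a ≤ col ∧ col < a + (fuel : Int) ∧
        PySem.List.pyGetD (PySem.List.pyGetD img r []) col c ≠ c := by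
  intro fuel
  induction fuel with
  | zero =>
    intro a
    constructor
    · intro h; simp [pienoRowF] at h
    · rintro ⟨col, h1, h2, _⟩; exfalso; omega
  | succ n ih =>
    intro a
    simp only [pienoRowF]
    split_ifs with hm
    · constructor
      · intro _; exact ⟨a, le_refl a, by omega, hm⟩
      · intro _; rfl
    · rw [ih (a + 1)]
      constructor
      · rintro ⟨col, h1, h2, h3⟩; exact ⟨col, by omega, by omega, h3⟩
      · rintro ⟨col, h1, h2, h3⟩
        rcases eq_or_lt_of_le h1 with rfl | h1'
        · exact absurd h3 hm
        · exact ⟨col, by omega, by omega, h3⟩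

theorem pienoScanF_eq_one_iff (img : List (List Int)) (c yi : Int) (w : Nat) :
    ∀ (fuel : Nat) (r o : Int), pienoScanF img c yi w fuel r o = 1 ↔
      o = 1 ∨ ∃ rr : Int, r ≤ rr ∧ rr < r + (fuel : Int) ∧
        ∃ col : Int, yi ≤ col ∧ col < yi + (w : Int) ∧
          PySem.List.pyGetD (PySem.List.pyGetD img rr []) col c ≠ c := by
  intro fuel
  induction fuel with
  | zero =>
    intro r o
    simp only [pienoScanF]
    constructor
    · exact Or.inl
    · rintro (h | ⟨rr, h1, h2, _⟩)
      · exact h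
      · exfalso; omega
  | succ n ih =>
    intro r o
    simp only [pienoScanF]
    rw [ih (r + 1)]
    split_ifs with hr
    · rw [pienoRowF_eq_one_iff] at hr
      constructor
      · intro _; exact Or.inr ⟨r, le_refl r, by omega, hr⟩
      · intro _; exact Or.inl rfl
    · rw [pienoRowF_eq_one_iff] at hr
      constructor
      · rintro (ho | ⟨rr, h1, h2, hcol⟩)
        · exact Or.inl ho
        · exact Or.inr ⟨rr, by omega, by omega, hcol⟩
      · rintro (ho | ⟨rr, h1, h2, hcol⟩)
        · exact Or.inl ho
        · rcases eq_or_lt_of_le h1 with rfl | h1'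
          · exact absurd hcol hr
          · exact Or.inr ⟨rr, by omega, by omega, hcol⟩

-- generic facts about max-only-raising folds
theorem fold_raise_le {α : Type} (f : Int → α → Int) (hf : ∀ m a, m ≤ f m a) :
    ∀ (l : List α) (m0 : Int), m0 ≤ l.foldl f m0 := by
  intro l
  induction l with
  | nil => intro m0; simp
  | cons h t ih => intro m0; exact le_trans (hf m0 h) (ih (f m0 h))

theorem fold_raise_gt_iff {α : Type} (f : Int → α → Int) (Q : α → Int → Prop)
    (hf : ∀ m a j, f m a > j ↔ m > j ∨ Q a j) :
    ∀ (l : List α) (m0 j : Int), l.foldl f m0 > j ↔ m0 > j ∨ ∃ a ∈ l, Q a j := by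
  intro l
  induction l with
  | nil => intro m0 j; simp
  | cons h t ih =>
    intro m0 j
    simp only [List.foldl_cons, ih, hf, List.mem_cons]
    constructor
    · rintro (( hm | hq) | ⟨a, ha, hqa⟩)
      · exact Or.inl hm
      · exact Or.inr ⟨h, Or.inl rfl, hq⟩
      · exact Or.inr ⟨a, Or.inr ha, hqa⟩
    · rintro (hm | ⟨a, (rfl | ha), hqa⟩)
      · exact Or.inl (Or.inl hm)
      · exact Or.inl (Or.inr hqa)
      · exact Or.inr ⟨a, ha, hqa⟩

-- abbreviation for B's fold (proof-local)
def pvM (xf yf xi yi : Int) (img : List (List Int)) (c : Int) : Int :=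
  (PySem.List.pyRange xi (xf + 1) 1).foldl (fun m r =>
    let row := PySem.List.pyGetD img r ([] : List Int)
    (PySem.List.pyRange yi (yf + 1) 1).foldl (fun m col =>
      if PySem.List.pyGetD row col c ≠ c then
        let d := min (xf - r) (yf - col) + 1
        if d > m then d else m
      else m) m) 0

theorem inner_step_gt_iff (row : List Int) (c xf yf r : Int) (m col j : Int) :
    (if PySem.List.pyGetD row col c ≠ c then
        (if min (xf - r) (yf - col) + 1 > m then min (xf - r) (yf - col) + 1 else m)
      else m) > j
      ↔ m > j ∨ (PySem.List.pyGetD row col c ≠ c ∧ min (xf - r) (yf - col) + 1 > j) := by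
  split_ifs with h1 h2 <;> simp [h1] <;> omega

theorem inner_step_le (row : List Int) (c xf yf r : Int) (m col : Int) :
    m ≤ (if PySem.List.pyGetD row col c ≠ c then
        (if min (xf - r) (yf - col) + 1 > m then min (xf - r) (yf - col) + 1 else m)
      else m) := by
  split_ifs <;> omega

theorem pvM_gt_iff (xf yf xi yi : Int) (img : List (List Int)) (c : Int) (j : Int)
    (hj : 0 ≤ j) :
    pvM xf yf xi yi img c > j ↔
      ∃ r ∈ PySem.List.pyRange xi (xf + 1) 1, ∃ col ∈ PySem.List.pyRange yi (yf + 1) 1,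
        PySem.List.pyGetD (PySem.List.pyGetD img r []) col c ≠ c ∧
          min (xf - r) (yf - col) + 1 > j := by
  have houter := fold_raise_gt_iff
    (f := fun m r => (PySem.List.pyRange yi (yf + 1) 1).foldl (fun m col =>
      if PySem.List.pyGetD (PySem.List.pyGetD img r []) col c ≠ c then
        (if min (xf - r) (yf - col) + 1 > m then min (xf - r) (yf - col) + 1 else m)
      else m) m)
    (Q := fun r j => ∃ col ∈ PySem.List.pyRange yi (yf + 1) 1,
      PySem.List.pyGetD (PySem.List.pyGetD img r []) col c ≠ c ∧ min (xf - r) (yf - col) + 1 > j)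
    (fun m r j' => fold_raise_gt_iff _ _
      (fun m' col j'' => inner_step_gt_iff (PySem.List.pyGetD img r []) c xf yf r m' col j'') _ m j')
    (PySem.List.pyRange xi (xf + 1) 1) 0 j
  unfold pvM
  exact houter.trans (or_iff_right (by omega))

theorem pvM_nonneg (xf yf xi yi : Int) (img : List (List Int)) (c : Int) :
    0 ≤ pvM xf yf xi yi img c := by
  unfold pvM
  exact fold_raise_le _
    (fun m r => fold_raise_le _ (fun m' col => inner_step_le _ c xf yf r m' col) _ m) _ 0

-- A's uniformity test at shrink stage j equals 'pvM > j'
theorem scan_iff_pvM (xf yf xi yi : Int) (img : List (List Int)) (c : Int) (j : Int)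
    (hj : 0 ≤ j) :
    (pienoScanF img c yi (yf - j + 1 - yi).toNat (xf - j + 1 - xi).toNat xi 0 = 1) ↔
      pvM xf yf xi yi img c > j := by
  rw [pienoScanF_eq_one_iff, pvM_gt_iff xf yf xi yi img c j hj]
  constructor
  · rintro (h0 | ⟨rr, h1, h2, col, h3, h4, hne⟩)
    · omega
    · refine ⟨rr, ?_, col, ?_, hne, by omega⟩ <;> (rw [PySem.List.mem_pyRange_one]; omega)
  · rintro ⟨r, hr, col, hc, hne, hd⟩
    rw [PySem.List.mem_pyRange_one] at hr hc
    exact Or.inr ⟨r, by omega, by omega, col, by omega, by omega, hne⟩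

-- the while loop, run from shrink stage j, ends at stage k = min(pvM, xf - xi)
theorem loop_eq (xi yi c : Int) (img : List (List Int)) (xf yf : Int) :
    ∀ (fuel : Nat) (j : Int), 0 ≤ j → j ≤ min (pvM xf yf xi yi img c) (xf - xi) →
      fuel = (xf - j - xi).toNat →
      pienoLoop xi yi c img fuel (xf - j) (yf - j) =
        (xf - min (pvM xf yf xi yi img c) (xf - xi),
         yf - min (pvM xf yf xi yi img c) (xf - xi)) := by
  intro fuel
  induction fuel with
  | zero =>
    intro j hj0 hjk hfuel
    have : xf - j - xi ≤ 0 := by omega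
    have hj : j = xf - xi := by omega
    have : min (pvM xf yf xi yi img c) (xf - xi) = j := by omega
    simp [pienoLoop, this]
  | succ n ih =>
    intro j hj0 hjk hfuel
    have hlt : xi < xf - j := by omega
    simp only [pienoLoop, if_pos hlt]
    by_cases hcase : j < min (pvM xf yf xi yi img c) (xf - xi)
    · have hM : pvM xf yf xi yi img c > j := by omega
      rw [← scan_iff_pvM xf yf xi yi img c j hj0] at hM
      rw [if_pos hM]
      have h1 : xf - j - 1 = xf - (j + 1) := by ring
      have h2 : yf - j - 1 = yf - (j + 1) := by ring
      rw [h1, h2]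
      exact ih (j + 1) (by omega) (by omega) (by omega)
    · have hjeq : j = min (pvM xf yf xi yi img c) (xf - xi) := by omega
      have hM : ¬ pvM xf yf xi yi img c > j := by omega
      rw [← scan_iff_pvM xf yf xi yi img c j hj0] at hM
      rw [if_neg hM, hjeq]

-- ===== VERDICT (by name: the statement is the Claim_ definition above) =====
theorem pieno_spec : Claim_equal_pieno := by
  intro xf yf xi yi x y img c _hdom _hpre
  unfold Spec_pieno pieno pieno_alt
  by_cases hx : xf ≤ xi
  · have : (xf - xi).toNat = 0 := by omega
    simp [this, pienoLoop, hx]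
  · by_cases hy' : yf < yi
    · rw [if_pos (Or.inr hy')]
      obtain ⟨n, hn⟩ : ∃ n, (xf - xi).toNat = n + 1 := ⟨(xf - xi).toNat - 1, by omega⟩
      rw [hn]
      simp only [pienoLoop, if_pos (by omega : xi < xf)]
      have hscan : ¬ pienoScanF img c yi (yf + 1 - yi).toNat (xf + 1 - xi).toNat xi 0 = 1 := by
        rw [pienoScanF_eq_one_iff]
        rintro (h | ⟨rr, h1, h2, col, h3, h4, _⟩)
        · exact absurd h (by norm_num)
        · omega
      rw [if_neg hscan]
    · rw [if_neg (by rintro (h | h) <;> omega)]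
      have h0 := loop_eq xi yi c img xf yf (xf - xi).toNat 0 le_rfl
        (by have := pvM_nonneg xf yf xi yi img c; omega) (by omega)
      simpa [pvM] using h0
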